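-- pv_equiv track=rewrite | github.com/batya239/rg-graph | packages/base/Graphine/graphine/generator/topology.py | AreMinimalNodesFromPool
-- ===== SOURCE A (Python) =====
-- import itertools
--
-- def AreMinimalNodesFromPool(free_node, pool_nodes):
--     '''Optimization to find early non-minimal nickel list.'''
--     if not pool_nodes:
--         return True
--     unique_nodes = []
--     group_lengths = []
--     for node, group_iter in itertools.groupby(pool_nodes):
--         unique_nodes.append(node)
--         group_lengths.append(len(tuple(group_iter)))
--     # Detect gap.
--     if unique_nodes[0] > free_node:
--         return False
--     if unique_nodes[-1] - unique_nodes[0] + 1 != len(unique_nodes):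
--         return False
--     # Lengths of groups should be non-increasing.
--     if group_lengths != sorted(group_lengths, reverse=True):
--         return False
--
--     return True
-- ===== SOURCE B (Python) =====
-- def AreMinimalNodesFromPool(free_node, pool_nodes):
--     '''Single streaming pass: no groupby lists, no sort.'''
--     if not pool_nodes:
--         return True
--     first = pool_nodes[0]
--     if first > free_node:
--         return False
--     prev_val = first
--     groups = 1
--     cur_len = 1
--     prev_len = None
--     for x in pool_nodes[1:]:
--         if x == prev_val:
--             cur_len += 1
--         else:
--             if prev_len is not None and cur_len > prev_len:
--                 return False
--             prev_len = cur_len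
--             cur_len = 1
--             prev_val = x
--             groups += 1
--     if prev_len is not None and cur_len > prev_len:
--         return False
--     return prev_val - first + 1 == groups
-- ===== Notes on version B (the rewrite author's own statement) =====
-- stated objective: alternative
-- what changed: Replaces the build-groupby-lists-then-sort-and-compare structure by a single streaming pass that keeps only the previous value, the current and previous run lengths and a group counter, checking non-increasing run lengths and the gap condition on the fly with no intermediate lists and no sort.
import Mathlib
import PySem

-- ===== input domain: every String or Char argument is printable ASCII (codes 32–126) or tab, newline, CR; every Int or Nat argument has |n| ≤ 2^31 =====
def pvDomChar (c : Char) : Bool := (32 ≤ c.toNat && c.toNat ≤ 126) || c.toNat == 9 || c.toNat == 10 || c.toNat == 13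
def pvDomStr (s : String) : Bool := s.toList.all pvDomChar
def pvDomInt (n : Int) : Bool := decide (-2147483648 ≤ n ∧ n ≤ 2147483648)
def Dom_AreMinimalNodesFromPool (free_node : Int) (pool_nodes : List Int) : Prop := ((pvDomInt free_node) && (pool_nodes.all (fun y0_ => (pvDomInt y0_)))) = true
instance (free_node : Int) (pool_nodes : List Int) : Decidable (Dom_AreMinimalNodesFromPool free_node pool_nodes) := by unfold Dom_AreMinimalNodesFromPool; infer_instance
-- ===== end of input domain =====

-- B replaces A's groupby-lists-then-sort structure by one streaming pass (no intermediate lists, no sort); same return value.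

-- ===== PORT A =====
-- the itertools.groupby loop: the ordered list of (node, group length) runs
def rleA : List Int → List (Int × Int)
  | [] => []
  | x :: xs =>
    (x, 1 + ((xs.takeWhile (fun y => decide (y = x))).length : Int))
      :: rleA (xs.dropWhile (fun y => decide (y = x)))
termination_by l => l.length
decreasing_by
  simp only [List.length_cons]
  exact Nat.lt_succ_of_le (List.length_dropWhile_le _ _)

def AreMinimalNodesFromPool (free_node : Int) (pool_nodes : List Int) : Bool :=
  match pool_nodes with
  | [] => true
  | _ :: _ =>
    let runs := rleA pool_nodes
    let unique_nodes := runs.map Prod.fst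
    let group_lengths := runs.map Prod.snd
    -- unique_nodes is nonempty here, so Python's [0] and [-1] are safe direct accesses
    if unique_nodes.headD 0 > free_node then false
    else if unique_nodes.getLastD 0 - unique_nodes.headD 0 + 1 ≠ (unique_nodes.length : Int) then false
    else if group_lengths ≠ PySem.List.sorted group_lengths (fun x => x) true then false
    else true

-- ===== PORT B =====
-- the 'prev_len is not None and cur_len > prev_len' test of Source B
def violB (prev_len : Option Int) (cur_len : Int) : Bool :=
  match prev_len with
  | some p => decide (cur_len > p)
  | none => false

-- the streaming loop of Source B; state = (prev_val, groups, cur_len, prev_len)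
def loopB (first prev_val groups cur_len : Int) (prev_len : Option Int) : List Int → Bool
  | [] =>
    if violB prev_len cur_len then false
    else decide (prev_val - first + 1 = groups)
  | x :: xs =>
    if x = prev_val then loopB first prev_val groups (cur_len + 1) prev_len xs
    else if violB prev_len cur_len then false
    else loopB first x (groups + 1) 1 (some cur_len) xs

def AreMinimalNodesFromPool_alt (free_node : Int) (pool_nodes : List Int) : Bool :=
  match pool_nodes with
  | [] => true
  | first :: rest =>
    if first > free_node then false
    else loopB first first 1 1 none rest

-- ===== PRECONDITION & SPEC =====
def Spec_AreMinimalNodesFromPool (free_node : Int) (pool_nodes : List Int) (out : Bool) : Prop := out = AreMinimalNodesFromPool_alt free_node pool_nodes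
instance (free_node : Int) (pool_nodes : List Int) (out : Bool) : Decidable (Spec_AreMinimalNodesFromPool free_node pool_nodes out) := by unfold Spec_AreMinimalNodesFromPool; infer_instance

-- ===== CLAIM (what is proved, stated in full; the proofs are below) =====
def Claim_equal_AreMinimalNodesFromPool : Prop := ∀ (free_node : Int) (pool_nodes : List Int), Dom_AreMinimalNodesFromPool free_node pool_nodes → Spec_AreMinimalNodesFromPool free_node pool_nodes (AreMinimalNodesFromPool free_node pool_nodes)

-- ===== LEMMAS AND PROOFS =====

-- the runs B's loop implicitly walks over: current open run (v, c) merged into the rest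
def runsF (v c : Int) : List Int → List (Int × Int)
  | [] => [(v, c)]
  | x :: xs => if x = v then runsF v (c + 1) xs else (v, c) :: runsF x 1 xs

-- value of the last run, seeded with d
def lastV (d : Int) : List (Int × Int) → Int
  | [] => d
  | (v, _) :: rest => lastV v rest

-- Bool check: lengths non-increasing, optionally bounded by a previous length
def noninc : Option Int → List Int → Bool
  | _, [] => true
  | none, l :: ls => noninc (some l) ls
  | some p, l :: ls => if l > p then false else noninc (some l) ls

theorem lastV_seed (K : List (Int × Int)) (d d' : Int) (h : K ≠ []) :
    lastV d K = lastV d' K := by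
  cases K with
  | nil => exact absurd rfl h
  | cons r rest => rfl

theorem runsF_ne_nil : ∀ (xs : List Int) (v c : Int), runsF v c xs ≠ [] := by
  intro xs
  induction xs with
  | nil => intro v c; simp [runsF]
  | cons x xs ih =>
    intro v c
    simp only [runsF]
    split
    · exact ih _ _
    · simp

theorem decide_eq_of_iff {p q : Prop} [Decidable p] [Decidable q] (h : p ↔ q) :
    decide p = decide q := decide_eq_decide.mpr h

theorem runsF_eq_rleA (xs : List Int) : ∀ (v c : Int),
    runsF v c xs = (v, c + ((xs.takeWhile (fun y => decide (y = v))).length : Int))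
      :: rleA (xs.dropWhile (fun y => decide (y = v))) := by
  induction xs with
  | nil => intro v c; simp [runsF, rleA]
  | cons x xs ih =>
    intro v c
    by_cases h : x = v
    · subst h
      have e1 : List.takeWhile (fun y => decide (y = x)) (x :: xs)
          = x :: List.takeWhile (fun y => decide (y = x)) xs := by simp [List.takeWhile]
      have e2 : List.dropWhile (fun y => decide (y = x)) (x :: xs)
          = List.dropWhile (fun y => decide (y = x)) xs := by simp [List.dropWhile]
      rw [e1, e2, show runsF x c (x :: xs) = runsF x (c + 1) xs from by simp [runsF], ih]
      simp only [List.length_cons]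
      congr 2
      push_cast
      ring
    · have e1 : List.takeWhile (fun y => decide (y = v)) (x :: xs) = [] := by
        simp [List.takeWhile, h]
      have e2 : List.dropWhile (fun y => decide (y = v)) (x :: xs) = x :: xs := by
        simp [List.dropWhile, h]
      rw [e1, e2, show runsF v c (x :: xs) = (v, c) :: runsF x 1 xs from by simp [runsF, h]]
      rw [ih x 1, rleA]
      norm_num

theorem loopB_eq (xs : List Int) : ∀ (first v g c : Int) (p : Option Int),
    loopB first v g c p xs =
      (noninc p ((runsF v c xs).map Prod.snd) &&
        decide (lastV 0 (runsF v c xs) - first + 1 = g + ((runsF v c xs).length : Int) - 1)) := by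
  induction xs with
  | nil =>
    intro first v g c p
    cases p with
    | none =>
      simp only [loopB, violB, if_false, Bool.false_eq_true, runsF, List.map, noninc, lastV,
        List.length_cons, List.length_nil, Bool.true_and]
      exact decide_eq_of_iff (by push_cast; omega)
    | some q =>
      by_cases hq : c > q
      · simp [loopB, violB, runsF, noninc, lastV, hq]
      · simp only [loopB, violB, decide_eq_true_eq, if_neg hq, runsF, List.map, noninc, lastV,
          List.length_cons, List.length_nil]
        simp only [Bool.true_and]
        exact decide_eq_of_iff (by push_cast; omega)
  | cons x xs ih =>
    intro first v g c p
    by_cases h : x = v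
    · simp only [loopB, if_pos h, runsF]
      exact ih first v g (c + 1) p
    · have hne := runsF_ne_nil xs x 1
      have hlast : lastV v (runsF x 1 xs) = lastV 0 (runsF x 1 xs) := lastV_seed _ _ _ hne
      have harith : ∀ L : List (Int × Int),
          (g + (((v, c) :: L).length : Int) - 1) = (g + 1) + (L.length : Int) - 1 := by
        intro L; simp only [List.length_cons]; push_cast; ring
      cases p with
      | none =>
        simp only [loopB, if_neg h, violB, if_false, Bool.false_eq_true, runsF, List.map_cons,
          noninc, lastV]
        rw [ih first x (g + 1) 1 (some c), hlast, harith]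
      | some q =>
        by_cases hq : c > q
        · simp [loopB, if_neg h, violB, hq, runsF, noninc]
        · simp only [loopB, if_neg h, violB, decide_eq_true_eq, if_neg hq, runsF, List.map_cons,
            noninc, lastV]
          rw [ih first x (g + 1) 1 (some c), hlast, harith]

theorem lastV_map_fst (rs : List (Int × Int)) : ∀ (d c0 : Int),
    (List.map Prod.fst ((d, c0) :: rs)).getLastD 0 = lastV d rs := by
  induction rs with
  | nil => intro d c0; simp [lastV]
  | cons r rs ih =>
    intro d c0
    obtain ⟨v, n⟩ := r
    simpa [lastV] using ih v n

theorem noninc_some_iff : ∀ (ls : List Int) (p : Int),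
    noninc (some p) ls = true ↔
      ((∀ x ∈ ls, x ≤ p) ∧ List.Pairwise (fun a b : Int => b ≤ a) ls) := by
  intro ls
  induction ls with
  | nil => intro p; simp [noninc]
  | cons l ls ih =>
    intro p
    by_cases h : l > p
    · simp only [noninc, if_pos h, Bool.false_eq_true, false_iff]
      intro ⟨h1, _⟩
      exact absurd (h1 l (List.mem_cons_self)) (by omega)
    · simp only [noninc, if_neg h, ih, List.pairwise_cons, List.mem_cons]
      constructor
      · rintro ⟨h1, h2⟩
        refine ⟨fun x hx => ?_, fun a ha => h1 a ha, h2⟩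
        rcases hx with rfl | hx
        · omega
        · have := h1 x hx
          omega
      · rintro ⟨h1, h2, h3⟩
        exact ⟨h2, h3⟩

theorem noninc_none_iff (ls : List Int) :
    noninc none ls = true ↔ List.Pairwise (fun a b : Int => b ≤ a) ls := by
  cases ls with
  | nil => simp [noninc]
  | cons l ls =>
    show noninc (some l) ls = true ↔ _
    rw [noninc_some_iff, List.pairwise_cons]

theorem sortedRev_eq_iff (g : List Int) :
    (g = PySem.List.sorted g (fun x => x) true) ↔ List.Pairwise (fun a b : Int => b ≤ a) g := by
  constructor
  · intro h
    have hp := PySem.List.sorted_pairwise_rev (xs := g) (key := fun x : Int => x)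
    rw [← h] at hp
    exact hp
  · intro h
    exact (PySem.List.sorted_rev_eq_self_of_pairwise g (fun x : Int => x) h).symm

-- ===== VERDICT (by name: the statement is the Claim_ definition above) =====
theorem AreMinimalNodesFromPool_spec : Claim_equal_AreMinimalNodesFromPool := by
  intro free_node pool_nodes _
  unfold Spec_AreMinimalNodesFromPool
  cases pool_nodes with
  | nil => rfl
  | cons x xs =>
    by_cases hf : x > free_node
    · simp [AreMinimalNodesFromPool, AreMinimalNodesFromPool_alt, rleA, hf]
    · have hrs : rleA (x :: xs)
          = (x, 1 + ((xs.takeWhile (fun y => decide (y = x))).length : Int))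
            :: rleA (xs.dropWhile (fun y => decide (y = x))) := by
        rw [rleA]
      have hr : runsF x 1 xs = rleA (x :: xs) := by
        rw [runsF_eq_rleA, hrs]
      simp only [AreMinimalNodesFromPool, AreMinimalNodesFromPool_alt, if_neg hf, loopB_eq, hr]
      generalize hn : (1 + ((xs.takeWhile (fun y => decide (y = x))).length : Int)) = n at hrs
      generalize hK : rleA (xs.dropWhile (fun y => decide (y = x))) = K at hrs
      rw [hrs]
      have hL : (x :: List.map Prod.fst K).getLastD 0 = lastV x K := by
        simpa using lastV_map_fst K x n
      simp only [List.map_cons, List.headD_cons, List.length_cons, List.length_map, lastV, hL,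
        if_neg hf]
      have esort : noninc none (n :: List.map Prod.snd K)
          = decide (n :: List.map Prod.snd K
              = PySem.List.sorted (n :: List.map Prod.snd K) (fun x => x) true) := by
        by_cases hs : List.Pairwise (fun a b : Int => b ≤ a) (n :: List.map Prod.snd K)
        · rw [(noninc_none_iff _).mpr hs, decide_eq_true ((sortedRev_eq_iff _).mpr hs)]
        · have h1 : noninc none (n :: List.map Prod.snd K) = false := by
            rw [← Bool.not_eq_true]
            intro hc
            exact hs ((noninc_none_iff _).mp hc)
          have h2 : ¬ (n :: List.map Prod.snd K
              = PySem.List.sorted (n :: List.map Prod.snd K) (fun x => x) true) :=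
            fun hc => hs ((sortedRev_eq_iff _).mp hc)
          rw [h1, decide_eq_false h2]
      rw [esort]
      simp [Bool.and_comm]
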